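-- pv_equiv track=rewrite | github.com/yteymur/Patika.Dev-Python | stringchanges.py | StringChanges
-- ===== SOURCE A (Python) =====
-- def StringChanges(strParam):
--   list1=list(strParam)
--   for _ in range(len(list1)):
--     if "M" in list1 and list1.index("M") == 0:
--         list1.pop(0)
--
--   for _ in range(len(list1)):
--     if "N" in list1:
--       try:
--         temp=list1.index("N")
--         list1.pop(list1.index("N"))
--         list1.pop(temp)
--       except IndexError:
--         pass
--
--   for _ in range(len(list1)):
--     if "M" in list1 and list1.index("M") == 0:
--         list1.pop(0)
--   for _ in range(len(list1)):
--     if "M" in list1 and list1.index("M") != 0: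
--         list1[list1.index("M")] =list1[(list1.index("M")-1)]
--   strParam="".join(list1)
--   return strParam
-- ===== SOURCE B (Python) =====
-- def StringChanges(strParam):
--     s = strParam
--     i = 0
--     while i < len(s) and s[i] == "M":
--         i += 1
--     kept = []
--     while i < len(s):
--         if s[i] == "N":
--             i += 2
--         else:
--             kept.append(s[i])
--             i += 1
--     j = 0
--     while j < len(kept) and kept[j] == "M":
--         j += 1
--     out = []
--     prev = None
--     for c in kept[j:]:
--         if c == "M" and prev is not None:
--             c = prev
--         out.append(c)
--         prev = c
--     return "".join(out)
-- ===== Notes on version B (the rewrite author's own statement) =====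
-- stated objective: faster
-- what changed: Replaces A's four quadratic rounds of repeated list.index/list.pop/in-place assignment with four single linear passes (pointer skip for leading M's, one skip-pass removing each N plus its successor, and one prev-carrying scan replacing interior M's).
import Mathlib
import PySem

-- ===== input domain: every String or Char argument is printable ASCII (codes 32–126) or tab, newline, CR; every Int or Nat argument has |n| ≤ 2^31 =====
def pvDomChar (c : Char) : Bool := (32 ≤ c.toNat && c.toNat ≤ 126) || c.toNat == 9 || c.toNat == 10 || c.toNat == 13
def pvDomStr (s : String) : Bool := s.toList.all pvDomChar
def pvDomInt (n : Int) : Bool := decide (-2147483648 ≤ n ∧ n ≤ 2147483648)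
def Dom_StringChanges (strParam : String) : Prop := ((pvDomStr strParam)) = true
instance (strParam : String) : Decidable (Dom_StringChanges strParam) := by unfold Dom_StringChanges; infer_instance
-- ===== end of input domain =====

-- B replaces A's four quadratic rounds of repeated index/pop/assignment with four linear passes (faster: asymptotic, O(n^2) → O(n)).

-- ===== PORT A =====
-- one iteration of A's leading-'M' loops: if "M" in list1 and list1.index("M") == 0: list1.pop(0)
def stepStripA (l : List Char) : List Char :=
  if 'M' ∈ l ∧ PySem.List.index? l 'M' = some 0 then
    match PySem.List.pop? l 0 with
    | some (_, rest) => rest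
    | none => l
  else l

-- one iteration of A's 'N' loop: temp = index("N"); pop(index("N")); pop(temp) (IndexError → pass)
def stepNA (l : List Char) : List Char :=
  if 'N' ∈ l then
    match PySem.List.index? l 'N' with
    | some temp =>
      match PySem.List.pop? l (temp : Int) with
      | some (_, l1) =>
        match PySem.List.pop? l1 (temp : Int) with
        | some (_, l2) => l2
        | none => l1            -- except IndexError: pass
      | none => l
    | none => l
  else l

-- one iteration of A's last loop: if "M" in list1 and index != 0: list1[index] = list1[index-1]
def stepMA (l : List Char) : List Char :=
  if 'M' ∈ l ∧ PySem.List.index? l 'M' ≠ some 0 then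
    match PySem.List.index? l 'M' with
    | some i =>
      match PySem.List.pyGet? l ((i : Int) - 1) with
      | some v => PySem.List.pySetD l (i : Int) v
      | none => l
    | none => l
  else l

def StringChanges (strParam : String) : String :=
  let l0 := strParam.toList
  let l1 := (List.range l0.length).foldl (fun acc _ => stepStripA acc) l0
  let l2 := (List.range l1.length).foldl (fun acc _ => stepNA acc) l1
  let l3 := (List.range l2.length).foldl (fun acc _ => stepStripA acc) l2
  let l4 := (List.range l3.length).foldl (fun acc _ => stepMA acc) l3
  String.ofList l4

-- ===== PORT B =====
-- the two 'while … == "M": i += 1' pointer loops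
def bStrip (l : List Char) : List Char := l.dropWhile (fun c => c == 'M')

-- the 'while i < len(s)' pass: an 'N' skips itself and the next character
def bSkipN : List Char → List Char
  | [] => []
  | [c] => if c = 'N' then [] else [c]
  | c :: d :: rest => if c = 'N' then bSkipN rest else c :: bSkipN (d :: rest)

-- the 'for c in kept[j:]' pass carrying prev
def bScan : Option Char → List Char → List Char
  | _, [] => []
  | p, c :: r =>
    let c' := if c = 'M' ∧ p.isSome then p.getD c else c
    c' :: bScan (some c') r

def StringChanges_alt (strParam : String) : String :=
  String.ofList (bScan none (bStrip (bSkipN (bStrip strParam.toList))))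

-- ===== PRECONDITION & SPEC =====
def Spec_StringChanges (strParam : String) (out : String) : Prop := out = StringChanges_alt strParam
instance (strParam : String) (out : String) : Decidable (Spec_StringChanges strParam out) := by unfold Spec_StringChanges; infer_instance

-- ===== CLAIM (what is proved, stated in full; the proofs are below) =====
def Claim_equal_StringChanges : Prop := ∀ (strParam : String), Dom_StringChanges strParam → Spec_StringChanges strParam (StringChanges strParam)

-- ===== LEMMAS AND PROOFS =====

theorem foldl_range_const {α : Type} (f : α → α) (n : Nat) (a : α) :
    (List.range n).foldl (fun x _ => f x) a = f^[n] a := by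
  induction n generalizing a with
  | zero => rfl
  | succ k ih =>
    rw [List.range_succ, List.foldl_append, ih, Function.iterate_succ_apply']
    rfl


-- pop?/index? computation helpers specific to the shapes A's loops produce
theorem pop?_zero (m : List Char) :
    PySem.List.pop? m (0:Int) = m.head?.map (fun x => (x, m.tail)) := by
  cases m <;> simp [PySem.List.pop?, PySem.List.pyIdx?]

theorem pop?_cons_succ (c : Char) (m : List Char) (k : Nat) :
    PySem.List.pop? (c :: m) ((k:Int)+1) = (PySem.List.pop? m (k:Int)).map (fun r => (r.1, c :: r.2)) := by
  by_cases hk : k < m.length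
  · have h1 : ((k:Int)+1) = ((k+1:Nat):Int) := by push_cast; ring
    rw [h1, PySem.List.pop?_natCast _ _ (by simpa using hk), PySem.List.pop?_natCast _ _ hk]
    simp
  · simp only [PySem.List.pop?, PySem.List.pyIdx?]
    have h0 : (0:Int) ≤ (k:Int) + 1 := by omega
    rw [if_pos h0]
    split_ifs with h2 h3 <;> simp_all

-- ===== phase 1 / phase 3: the leading-'M' strip =====
theorem stepStripA_eq (l : List Char) :
    stepStripA l = if l.head? = some 'M' then l.tail else l := by
  cases l with
  | nil => simp [stepStripA]
  | cons c t =>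
    by_cases hc : c = 'M'
    · subst hc
      rw [stepStripA, if_pos ⟨List.mem_cons_self, PySem.List.index?_cons_self 'M' t⟩]
      simp
    · have hcond : ¬('M' ∈ c :: t ∧ PySem.List.index? (c :: t) 'M' = some 0) := by
        rintro ⟨-, h0⟩
        rw [PySem.List.index?_cons_of_ne t hc] at h0
        cases PySem.List.index? t 'M' <;> simp at h0
      rw [stepStripA, if_neg hcond, if_neg (by simp [hc])]

theorem bStrip_of_head_ne (l : List Char) (h : l.head? ≠ some 'M') : bStrip l = l := by
  cases l with
  | nil => rfl
  | cons c t =>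
    simp only [List.head?_cons, ne_eq, Option.some.injEq] at h
    simp [bStrip, h]

theorem head?_bStrip (l : List Char) : (bStrip l).head? ≠ some 'M' := by
  induction l with
  | nil => simp [bStrip]
  | cons c t ih =>
    by_cases hc : c = 'M'
    · simpa [bStrip, List.dropWhile_cons, hc] using ih
    · simp [bStrip, hc]

theorem stepStripA_iterate : ∀ (n : Nat) (l : List Char), l.length ≤ n →
    stepStripA^[n] l = bStrip l := by
  intro n
  induction n with
  | zero =>
    intro l hl
    have : l = [] := List.eq_nil_of_length_eq_zero (Nat.le_zero.mp hl)
    subst this; rfl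
  | succ k ih =>
    intro l hl
    by_cases h : l.head? = some 'M'
    · cases l with
      | nil => simp at h
      | cons c t =>
        simp only [List.head?_cons, Option.some.injEq] at h
        subst h
        rw [Function.iterate_succ_apply, stepStripA_eq]
        simp only [List.head?_cons, List.tail_cons, reduceIte]
        rw [ih t (by simpa using Nat.lt_succ_iff.mp (Nat.lt_of_lt_of_le (Nat.lt_succ_self _) hl))]
        simp [bStrip]
    · have hfix : stepStripA l = l := by rw [stepStripA_eq, if_neg h]
      rw [Function.iterate_fixed hfix, bStrip_of_head_ne l h]

-- ===== phase 2: the 'N'-pair removal =====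
theorem stepNA_of_not_mem (l : List Char) (h : 'N' ∉ l) : stepNA l = l := by
  simp [stepNA, h]

theorem stepNA_cons_N (t : List Char) : stepNA ('N' :: t) = t.tail := by
  rw [stepNA, if_pos List.mem_cons_self, PySem.List.index?_cons_self 'N' t]
  simp only [Nat.cast_zero, pop?_zero]
  cases t with
  | nil => simp
  | cons d r => simp

theorem stepNA_cons_ne (c : Char) (t : List Char) (hc : c ≠ 'N') (ht : 'N' ∈ t) :
    stepNA (c :: t) = c :: stepNA t := by
  obtain ⟨k, hk⟩ := Option.isSome_iff_exists.mp ((PySem.List.index?_isSome_iff t 'N').mpr ht)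
  have hkl : k < t.length := by
    obtain ⟨hlt, -, -⟩ := PySem.List.getElem_of_index?_eq_some hk
    exact hlt
  rw [stepNA, if_pos (List.mem_cons_of_mem _ ht),
      PySem.List.index?_cons_of_ne t hc, hk]
  rw [stepNA, if_pos ht, hk]
  simp only [Option.map_some]
  have hcast : ((k + 1 : Nat) : Int) = (k : Int) + 1 := by push_cast; ring
  rw [hcast, pop?_cons_succ, PySem.List.pop?_natCast _ _ hkl]
  simp only [Option.map_some]
  rw [pop?_cons_succ]
  cases h2 : PySem.List.pop? (t.eraseIdx k) (k : Int) <;> simp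

theorem bSkipN_of_not_mem (l : List Char) (h : 'N' ∉ l) : bSkipN l = l := by
  fun_induction bSkipN l <;> simp_all

theorem bSkipN_cons_N (t : List Char) : bSkipN ('N' :: t) = bSkipN t.tail := by
  cases t <;> simp [bSkipN]

theorem bSkipN_cons_ne (c : Char) (t : List Char) (hc : c ≠ 'N') :
    bSkipN (c :: t) = c :: bSkipN t := by
  cases t <;> simp [bSkipN, hc]

theorem stepNA_length (l : List Char) (h : 'N' ∈ l) : (stepNA l).length < l.length := by
  induction l with
  | nil => simp at h
  | cons c t ih =>
    by_cases hc : c = 'N'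
    · subst hc
      rw [stepNA_cons_N]
      simp only [List.length_cons]
      have h2 : t.tail.length = t.length - 1 := List.length_tail
      omega
    · have ht : 'N' ∈ t := by
        rcases List.mem_cons.mp h with h1 | h1
        · exact absurd h1.symm hc
        · exact h1
      rw [stepNA_cons_ne c t hc ht]
      simpa using ih ht

theorem bSkipN_stepNA (l : List Char) (h : 'N' ∈ l) : bSkipN (stepNA l) = bSkipN l := by
  induction l with
  | nil => simp at h
  | cons c t ih =>
    by_cases hc : c = 'N'
    · subst hc
      rw [stepNA_cons_N, bSkipN_cons_N]
    · have ht : 'N' ∈ t := by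
        rcases List.mem_cons.mp h with h1 | h1
        · exact absurd h1.symm hc
        · exact h1
      rw [stepNA_cons_ne c t hc ht, bSkipN_cons_ne _ _ hc, bSkipN_cons_ne _ _ hc, ih ht]

theorem stepNA_iterate : ∀ (n : Nat) (l : List Char), l.length ≤ n →
    stepNA^[n] l = bSkipN l := by
  intro n
  induction n with
  | zero =>
    intro l hl
    have : l = [] := List.eq_nil_of_length_eq_zero (Nat.le_zero.mp hl)
    subst this; rfl
  | succ k ih =>
    intro l hl
    by_cases h : 'N' ∈ l
    · rw [Function.iterate_succ_apply,
          ih _ (by have := stepNA_length l h; omega), bSkipN_stepNA l h]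
    · rw [Function.iterate_fixed (stepNA_of_not_mem l h), bSkipN_of_not_mem l h]

-- ===== phase 4: replacing interior 'M's =====
theorem bScan_of_not_mem (l : List Char) (p : Option Char) (h : 'M' ∉ l) :
    bScan p l = l := by
  induction l generalizing p with
  | nil => rfl
  | cons c t ih =>
    simp only [List.mem_cons, not_or] at h
    have hcM : ¬(c = 'M' ∧ p.isSome = true) := fun hx => h.1 hx.1.symm
    simp only [bScan]
    rw [if_neg hcM, ih _ h.2]

theorem bScan_append (pre : List Char) (t : List Char) (p : Option Char)
    (hne : pre ≠ []) (hM : 'M' ∉ pre) :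
    bScan p (pre ++ t) = pre ++ bScan (some (pre.getLast hne)) t := by
  induction pre generalizing p with
  | nil => exact absurd rfl hne
  | cons c r ih =>
    simp only [List.mem_cons, not_or] at hM
    have hcM : ¬(c = 'M' ∧ p.isSome = true) := fun hx => hM.1 hx.1.symm
    cases r with
    | nil =>
      simp only [List.cons_append, List.nil_append, bScan]
      rw [if_neg hcM]
      simp [List.getLast]
    | cons d s =>
      rw [List.cons_append]
      simp only [bScan]
      rw [if_neg hcM, ih _ (by simp) hM.2]
      simp [List.getLast]

theorem stepMA_decomp (pre suf : List Char) (hne : pre ≠ []) (hM : 'M' ∉ pre) :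
    stepMA (pre ++ 'M' :: suf) = pre ++ pre.getLast hne :: suf := by
  have hidx : PySem.List.index? (pre ++ 'M' :: suf) 'M' = some pre.length :=
    (PySem.List.index?_eq_some_iff _ 'M' _).mpr ⟨pre, suf, rfl, rfl, hM⟩
  have hmem : 'M' ∈ pre ++ 'M' :: suf := by simp
  have hpos : 0 < pre.length := List.length_pos_iff.mpr hne
  rw [stepMA, if_pos ⟨hmem, by rw [hidx]; simp; omega⟩, hidx]
  dsimp only
  have hcast : ((pre.length : Int) - 1) = ((pre.length - 1 : Nat) : Int) := by
    push_cast [hpos]; omega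
  have hlt : pre.length - 1 < (pre ++ 'M' :: suf).length := by
    simp [List.length_append]; omega
  rw [hcast, PySem.List.pyGet?_natCast]
  rw [List.getElem?_eq_getElem hlt]
  simp only [PySem.List.pySetD_natCast]
  have hget : (pre ++ 'M' :: suf)[pre.length - 1]'hlt = pre.getLast hne := by
    rw [List.getElem_append_left (by omega), List.getLast_eq_getElem]
  rw [hget, List.set_append_right _ _ (Nat.le_refl _)]
  simp

theorem stepMA_of_not_mem (l : List Char) (h : 'M' ∉ l) : stepMA l = l := by
  rw [stepMA, if_neg]
  rintro ⟨h1, -⟩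
  exact h h1

theorem count_pos_of_mem_M (l : List Char) (h : 'M' ∈ l) : 0 < l.count 'M' :=
  List.count_pos_iff.mpr h

theorem stepMA_iterate : ∀ (n : Nat) (l : List Char), l.count 'M' ≤ n →
    l.head? ≠ some 'M' → stepMA^[n] l = bScan none l := by
  intro n
  induction n with
  | zero =>
    intro l hc hh
    have : 'M' ∉ l := by
      intro h
      exact absurd (count_pos_of_mem_M l h) (by omega)
    rw [Function.iterate_zero_apply, bScan_of_not_mem l none this]
  | succ k ih =>
    intro l hc hh
    by_cases h : 'M' ∈ l
    · -- decompose at the first 'M'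
      obtain ⟨i, hi⟩ := Option.isSome_iff_exists.mp ((PySem.List.index?_isSome_iff l 'M').mpr h)
      obtain ⟨pre, suf, hl, hlen, hpre⟩ := (PySem.List.index?_eq_some_iff _ 'M' _).mp hi
      have hne : pre ≠ [] := by
        rintro rfl
        rw [hl] at hh
        simp at hh
      have hglast : pre.getLast hne ∉ ['M'] := by
        simp only [List.mem_singleton]
        intro hg
        exact hpre (hg ▸ List.getLast_mem hne)
      have hgM : pre.getLast hne ≠ 'M' := by simpa using hglast
      subst hl
      rw [Function.iterate_succ_apply, stepMA_decomp pre suf hne hpre]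
      have hcount : (pre ++ pre.getLast hne :: suf).count 'M' ≤ k := by
        have h1 : (pre ++ 'M' :: suf).count 'M' = pre.count 'M' + (suf.count 'M' + 1) := by
          simp [List.count_append]
        have h2 : (pre ++ pre.getLast hne :: suf).count 'M'
            = pre.count 'M' + suf.count 'M' := by
          simp [List.count_append, hgM]
        omega
      have hhead : (pre ++ pre.getLast hne :: suf).head? ≠ some 'M' := by
        cases pre with
        | nil => exact absurd rfl hne
        | cons a b =>
          simpa using (by simpa using hh : a ≠ 'M')
      rw [ih _ hcount hhead]
      rw [bScan_append pre _ none hne hpre, bScan_append pre _ none hne hpre]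
      rw [bScan, bScan]
      simp [hgM]
    · rw [Function.iterate_fixed (stepMA_of_not_mem l h), bScan_of_not_mem l none h]

-- ===== VERDICT (by name: the statement is the Claim_ definition above) =====
theorem StringChanges_spec : Claim_equal_StringChanges := by
  intro s _
  unfold Spec_StringChanges StringChanges StringChanges_alt
  simp only [foldl_range_const]
  rw [stepStripA_iterate _ _ le_rfl]
  rw [stepNA_iterate _ _ le_rfl]
  rw [stepStripA_iterate _ _ le_rfl]
  rw [stepMA_iterate _ _ List.count_le_length (head?_bStrip _)]
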